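-- pv_equiv track=rewrite | github.com/alexanderacevedo0831-lgtm/Plates.py | Week 2/plates/plates.py | numbers_at_end
-- ===== SOURCE A (Python) =====
-- def numbers_at_end(s):
--     number_started = False
--     for i, char in enumerate(s):
--         if char.isdigit():
--             if not number_started:
--             # first number cannot be '0'
--                 if char == '0':
--                     return False
--             # everything after the first number must be a number
--             number_started = True
--         else:
--             if number_started:
--                 return False
--     return True
-- ===== SOURCE B (Python) =====
-- def numbers_at_end(s):
--     # Right-to-left strategy: strip the maximal trailing digit block, then the
--     # block must not start with '0' and the remaining prefix must be digit-free.
--     rev = s[::-1]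
--     k = 0
--     while k < len(rev) and rev[k].isdigit():
--         k += 1
--     block = rev[:k][::-1]
--     rest = rev[k:][::-1]
--     if block and block[0] == '0':
--         return False
--     return not any(c.isdigit() for c in rest)
-- ===== Notes on version B (the rewrite author's own statement) =====
-- stated objective: alternative
-- what changed: B scans from the RIGHT: it strips the maximal trailing digit block off the reversed string, then returns False if the block starts with '0' and otherwise checks that the remaining prefix is digit-free, replacing A's forward scan with a number_started flag.
import Mathlib
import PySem

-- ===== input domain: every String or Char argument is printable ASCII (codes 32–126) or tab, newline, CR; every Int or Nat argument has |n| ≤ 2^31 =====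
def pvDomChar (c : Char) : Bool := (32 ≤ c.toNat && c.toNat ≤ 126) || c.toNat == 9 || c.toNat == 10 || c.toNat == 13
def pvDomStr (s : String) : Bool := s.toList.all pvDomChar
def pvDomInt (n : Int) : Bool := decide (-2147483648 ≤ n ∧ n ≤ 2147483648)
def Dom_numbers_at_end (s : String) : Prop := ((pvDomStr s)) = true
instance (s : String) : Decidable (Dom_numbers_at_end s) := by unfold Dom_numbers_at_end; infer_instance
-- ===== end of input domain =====

-- B replaces A's forward scan with a number_started flag by a right-to-left strategy:
-- strip the maximal trailing digit block, reject a block starting with '0', and require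
-- the remaining prefix to be digit-free (objective: alternative, same cost).

-- ===== PORT A =====
-- A's for-loop over the characters with the number_started flag as loop state.
def numbersAtEndLoopA : List Char → Bool → Bool
  | [], _ => true
  | c :: rest, started =>
    if PySem.Chars.isdigit c then
      if !started then
        if c = '0' then false
        else numbersAtEndLoopA rest true
      else numbersAtEndLoopA rest true
    else
      if started then false
      else numbersAtEndLoopA rest started

def numbers_at_end (s : String) : Bool := numbersAtEndLoopA s.toList false

-- ===== PORT B =====
-- Source B's while-loop 'while k < len(rev) and rev[k].isdigit(): k += 1' counts the digit
-- prefix of rev by walking it from the front; ported as the structural recursion doing that.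
def digitPrefixLenB : List Char → Nat
  | [] => 0
  | c :: rest => if PySem.Chars.isdigit c then digitPrefixLenB rest + 1 else 0

def numbers_at_end_alt (s : String) : Bool :=
  let rev := s.toList.reverse
  let k := digitPrefixLenB rev
  let block := (rev.take k).reverse        -- rev[:k][::-1], the trailing digit block
  let rest := (rev.drop k).reverse         -- rev[k:][::-1], everything before it
  if block.head? = some '0' then false      -- 'if block and block[0] == "0": return False'
  else !(rest.any PySem.Chars.isdigit)      -- 'return not any(c.isdigit() for c in rest)'

-- ===== PRECONDITION & SPEC =====
def Spec_numbers_at_end (s : String) (out : Bool) : Prop := out = numbers_at_end_alt s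
instance (s : String) (out : Bool) : Decidable (Spec_numbers_at_end s out) := by unfold Spec_numbers_at_end; infer_instance

-- ===== CLAIM (what is proved, stated in full; the proofs are below) =====
def Claim_equal_numbers_at_end : Prop := ∀ (s : String), Dom_numbers_at_end s → Spec_numbers_at_end s (numbers_at_end s)

-- ===== LEMMAS AND PROOFS =====
-- After the flag is set, A's loop returns true iff every remaining character is a digit.
theorem loopA_true_eq_all (l : List Char) :
    numbersAtEndLoopA l true = l.all PySem.Chars.isdigit := by
  induction l with
  | nil => rfl
  | cons c rest ih =>
    simp only [numbersAtEndLoopA, List.all_cons]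
    by_cases h : PySem.Chars.isdigit c <;> simp [h, ih]

-- B's counter computes the length of the digit prefix, so take/drop at it are takeWhile/dropWhile.
theorem take_digitPrefixLenB (l : List Char) :
    l.take (digitPrefixLenB l) = l.takeWhile PySem.Chars.isdigit := by
  induction l with
  | nil => rfl
  | cons c rest ih =>
    simp only [digitPrefixLenB, List.takeWhile_cons]
    by_cases h : PySem.Chars.isdigit c <;> simp [h, ih]

theorem drop_digitPrefixLenB (l : List Char) :
    l.drop (digitPrefixLenB l) = l.dropWhile PySem.Chars.isdigit := by
  induction l with
  | nil => rfl
  | cons c rest ih =>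
    simp only [digitPrefixLenB, List.dropWhile_cons]
    by_cases h : PySem.Chars.isdigit c <;> simp [h, ih]

-- A's flag-off loop skips a digit-free prefix unchanged.
theorem loopA_append_nondigit (p d : List Char)
    (hp : ∀ c ∈ p, ¬ PySem.Chars.isdigit c) :
    numbersAtEndLoopA (p ++ d) false = numbersAtEndLoopA d false := by
  induction p with
  | nil => rfl
  | cons c p' ih =>
    have hc : ¬ PySem.Chars.isdigit c := hp c (by simp)
    simp only [List.cons_append, numbersAtEndLoopA, hc]
    simpa using ih (fun x hx => hp x (by simp [hx]))

-- The head of a nonempty dropWhile result falsifies the predicate.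
theorem dropWhile_cons_head_false {l r : List Char} {c : Char} {p : Char → Bool}
    (h : l.dropWhile p = c :: r) : p c = false := by
  induction l with
  | nil => simp at h
  | cons a t ih =>
    rw [List.dropWhile_cons] at h
    split at h
    · exact ih h
    · cases h; simp_all

-- Main decomposition lemma: on p ++ d with d all digits and p ending in a non-digit
-- (or empty), A's loop returns (head of d ≠ '0') && (p is digit-free).
theorem loopA_split (p d : List Char)
    (hd : ∀ c ∈ d, PySem.Chars.isdigit c)
    (hp : ∀ c, p.getLast? = some c → ¬ PySem.Chars.isdigit c) :
    numbersAtEndLoopA (p ++ d) false =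
      ((decide (d.head? ≠ some '0')) && !(p.any PySem.Chars.isdigit)) := by
  by_cases hpd : p.any PySem.Chars.isdigit
  · -- p contains a digit: A hits it before p's non-digit last element → both sides false.
    have hrhs : ((decide (d.head? ≠ some '0')) && !(p.any PySem.Chars.isdigit)) = false := by
      simp [hpd]
    rw [hrhs]
    rw [List.any_eq_true] at hpd
    obtain ⟨x, hxmem, hx⟩ := hpd
    -- split p at its first digit: p = q ++ c0 :: r', q digit-free, c0 a digit
    have hsplit : p.takeWhile (fun c => !PySem.Chars.isdigit c)
        ++ p.dropWhile (fun c => !PySem.Chars.isdigit c) = p :=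
      List.takeWhile_append_dropWhile
    have hrne : p.dropWhile (fun c => !PySem.Chars.isdigit c) ≠ [] := by
      intro hnil
      rw [List.dropWhile_eq_nil_iff] at hnil
      have := hnil x hxmem
      simp [hx] at this
    obtain ⟨c0, r', hr'⟩ := List.exists_cons_of_ne_nil hrne
    have hc0 : PySem.Chars.isdigit c0 := by
      have := dropWhile_cons_head_false hr'
      simpa using this
    have hqnd : ∀ c ∈ p.takeWhile (fun c => !PySem.Chars.isdigit c),
        ¬ PySem.Chars.isdigit c := by
      intro c hc
      have := List.mem_takeWhile_imp hc
      simpa using this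
    have h2 : p = p.takeWhile (fun c => !PySem.Chars.isdigit c) ++ (c0 :: r') := by
      rw [← hr']; exact hsplit.symm
    -- the last element of p is a non-digit, and it lies in r' ++ d (r' in fact)
    have hallfalse : (r' ++ d).all PySem.Chars.isdigit = false := by
      rcases List.eq_nil_or_concat r' with hnil | ⟨t, y, hty⟩
      · -- r' = []: then p ends with c0, a digit — contradicts hp
        exfalso
        subst hnil
        have : p.getLast? = some c0 := by rw [h2]; simp
        exact hp c0 this hc0
      · -- r' = t ++ [y]: y is p's last element, non-digit
        have hty' : r' = t ++ [y] := by simpa [List.concat_eq_append] using hty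
        have hy : ¬ PySem.Chars.isdigit y := by
          apply hp y
          rw [h2, hty']
          rw [show p.takeWhile (fun c => !PySem.Chars.isdigit c) ++ c0 :: (t ++ [y])
              = (p.takeWhile (fun c => !PySem.Chars.isdigit c) ++ c0 :: t) ++ [y] by
            simp]
          exact List.getLast?_concat
        rw [List.all_eq_false]
        exact ⟨y, by simp [hty'], by simpa using hy⟩
    rw [h2, List.append_assoc, loopA_append_nondigit _ _ hqnd]
    simp only [List.cons_append, numbersAtEndLoopA, hc0]
    by_cases h0 : c0 = '0'
    · simp [h0]
    · simp [h0, loopA_true_eq_all, hallfalse]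
  · -- p digit-free: A skips p, then runs on the all-digit d.
    have hpnd : ∀ c ∈ p, ¬ PySem.Chars.isdigit c := by
      intro c hc hcd
      exact hpd (List.any_eq_true.mpr ⟨c, hc, hcd⟩)
    rw [loopA_append_nondigit p d hpnd]
    cases d with
    | nil => simp [numbersAtEndLoopA, hpd]
    | cons c0 d' =>
      have hc0 : PySem.Chars.isdigit c0 := hd c0 (by simp)
      simp only [numbersAtEndLoopA, hc0]
      by_cases h0 : c0 = '0'
      · simp [h0]
      · have : d'.all PySem.Chars.isdigit = true := by
          rw [List.all_eq_true]; intro c hc; exact hd c (by simp [hc])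
        simp [h0, loopA_true_eq_all, this, hpd]

-- B's value in terms of rtakeWhile/rdropWhile, then matched against loopA_split.
theorem loopA_eq_altB (l : List Char) :
    numbersAtEndLoopA l false =
      (if (l.reverse.take (digitPrefixLenB l.reverse)).reverse.head? = some '0' then false
       else !((l.reverse.drop (digitPrefixLenB l.reverse)).reverse.any PySem.Chars.isdigit)) := by
  rw [take_digitPrefixLenB, drop_digitPrefixLenB]
  have hblock : (l.reverse.takeWhile PySem.Chars.isdigit).reverse
      = l.rtakeWhile PySem.Chars.isdigit := rfl
  have hrest : (l.reverse.dropWhile PySem.Chars.isdigit).reverse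
      = l.rdropWhile PySem.Chars.isdigit := rfl
  rw [hblock, hrest]
  have hsplit : l.rdropWhile PySem.Chars.isdigit ++ l.rtakeWhile PySem.Chars.isdigit = l :=
    List.rdropWhile_append_rtakeWhile
  have hd : ∀ c ∈ l.rtakeWhile PySem.Chars.isdigit, PySem.Chars.isdigit c :=
    fun _ hc => List.mem_rtakeWhile_imp hc
  have hplast : ∀ c, (l.rdropWhile PySem.Chars.isdigit).getLast? = some c →
      ¬ PySem.Chars.isdigit c := by
    intro c hc
    have hne : l.rdropWhile PySem.Chars.isdigit ≠ [] := by
      intro hnil; rw [hnil] at hc; simp at hc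
    have h1 := List.rdropWhile_last_not (p := PySem.Chars.isdigit) (l := l) hne
    have h2 : (l.rdropWhile PySem.Chars.isdigit).getLast hne = c :=
      (List.getLast?_eq_some_getLast hne ▸ hc : _) |> Option.some.inj
    rwa [h2] at h1
  conv_lhs => rw [← hsplit]
  rw [loopA_split _ _ hd hplast]
  by_cases h0 : (l.rtakeWhile PySem.Chars.isdigit).head? = some '0' <;> simp [h0]

-- ===== VERDICT (by name: the statement is the Claim_ definition above) =====
theorem numbers_at_end_spec : Claim_equal_numbers_at_end := by
  intro s _
  unfold Spec_numbers_at_end numbers_at_end numbers_at_end_alt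
  simpa using loopA_eq_altB s.toList
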